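-- pv_equiv track=rewrite | github.com/andersondomingues/orca-rt-tools | rt_tools_pybackend/heuristics.py | mbul
-- ===== SOURCE A (Python) =====
-- from math import inf
--
-- def mbul(solution_space, min_start, O, deadline):
--   sumsl = [0 for x in O]
--   sumsp = [0 for x in O[0]]
--
--   # find capacity of all links
--   for l in range(0, len(O)):
--     for p in range(0, len(O[0])):
--       if(O[l][p] != None):
--         sumsl[l] += O[l][p]
--         sumsp[p] += O[l][p]
--
--
--   # sorte packets from the least consuming to the most consuming
--   # (most consuming will be consumed first)
--   list = []
--
--   removed = True
--   while removed:
--     lowest = +inf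
--     idx = +inf
--
--     removed = False
--
--     for i in range(0, len(sumsp)):
--       if sumsp[i] < lowest:
--         lowest = sumsp[i]
--         idx = i
--
--     if lowest != +inf:
--       list.append(idx)
--       sumsp[idx] = +inf
--       removed = True
--
--   return list
-- ===== SOURCE B (Python) =====
-- def mbul(solution_space, min_start, O, deadline):
--   sums = [0] * len(O[0])
--   for row in O:
--     sums = [s + (v if v is not None else 0) for s, v in zip(sums, row)]
--   return sorted(range(len(sums)), key=sums.__getitem__)
-- ===== Notes on version B (the rewrite author's own statement) =====
-- stated objective: faster
-- what changed: Column sums are accumulated row-by-row with zip instead of index-based nested loops, and the O(m^2) repeated selection-of-minimum while-loop is replaced by a single stable library sort of the column indices keyed by their sums (ties break to the lower index in both).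
import Mathlib
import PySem

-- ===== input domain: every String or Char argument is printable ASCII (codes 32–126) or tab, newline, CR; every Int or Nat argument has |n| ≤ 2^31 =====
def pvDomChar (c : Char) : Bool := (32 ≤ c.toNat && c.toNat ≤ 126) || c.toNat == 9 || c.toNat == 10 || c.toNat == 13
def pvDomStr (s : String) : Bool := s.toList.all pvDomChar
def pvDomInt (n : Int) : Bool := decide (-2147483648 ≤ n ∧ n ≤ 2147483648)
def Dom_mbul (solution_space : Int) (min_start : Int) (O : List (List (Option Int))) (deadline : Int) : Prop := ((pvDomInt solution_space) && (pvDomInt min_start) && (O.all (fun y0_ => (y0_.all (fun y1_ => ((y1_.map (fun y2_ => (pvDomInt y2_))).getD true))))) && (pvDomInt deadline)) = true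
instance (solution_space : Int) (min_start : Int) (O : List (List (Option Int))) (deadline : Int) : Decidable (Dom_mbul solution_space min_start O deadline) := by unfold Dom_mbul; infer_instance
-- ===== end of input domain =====

-- ===== PORT A =====
-- B replaces the index-based accumulation and the O(m^2) repeated selection-of-minimum
-- while-loop of A by a row-wise zip accumulation and one stable sort of the column indices.
-- A-side helpers: mbulStep/mbulSums are the nested 'for l … for p …' accumulation of
-- (sumsl, sumsp); mbulScanStep/mbulScan are the inner 'for i' argmin pass; mbulLoop is the
-- 'while removed' loop.  In the loop state, 'none' encodes the '+inf' marker Python writes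
-- over consumed entries (and the initial '+inf' of 'lowest'/'idx').  The 'fuel' argument
-- (#entries + 1) only bounds the number of iterations, which Python's loop never exceeds.
def mbulStep (row : List (Option Int)) (l : Int) (st : List Int × List Int) (p : Int) :
    List Int × List Int :=
  match PySem.List.pyGetD row p none with
  | some v =>
      (PySem.List.pySetD st.1 l (PySem.List.pyGetD st.1 l 0 + v),
       PySem.List.pySetD st.2 p (PySem.List.pyGetD st.2 p 0 + v))
  | none => st

def mbulSums (O : List (List (Option Int))) : List Int × List Int :=
  (PySem.List.pyRange 0 (PySem.List.len O) 1).foldl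
    (fun st l =>
      (PySem.List.pyRange 0 (PySem.List.len (PySem.List.pyGetD O 0 [])) 1).foldl
        (mbulStep (PySem.List.pyGetD O l []) l) st)
    (O.map (fun _ => (0:Int)), (PySem.List.pyGetD O 0 []).map (fun _ => (0:Int)))

def mbulScanStep (sumsp : List (Option Int)) (st : Option Int × Option Int) (i : Int) :
    Option Int × Option Int :=
  match PySem.List.pyGetD sumsp i none, st.1 with
  | some v, none => (some v, some i)
  | some v, some lo => if v < lo then (some v, some i) else st
  | none, _ => st

def mbulScan (sumsp : List (Option Int)) : Option Int × Option Int :=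
  (PySem.List.pyRange 0 (PySem.List.len sumsp) 1).foldl (mbulScanStep sumsp) (none, none)

def mbulLoop : Nat → List (Option Int) → List Int → List Int
  | 0, _, acc => acc
  | fuel+1, sumsp, acc =>
    match mbulScan sumsp with
    | (some _, some idx) => mbulLoop fuel (PySem.List.pySetD sumsp idx none) (acc ++ [idx])
    | _ => acc

def mbul (solution_space : Int) (min_start : Int) (O : List (List (Option Int))) (deadline : Int) : List Int :=
  let sumsp : List (Option Int) := (mbulSums O).2.map some
  mbulLoop (sumsp.length + 1) sumsp []

-- ===== PORT B =====
def mbul_alt (solution_space : Int) (min_start : Int) (O : List (List (Option Int))) (deadline : Int) : List Int :=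
  let sums := O.foldl (fun s row => List.zipWith (fun a v => a + v.getD 0) s row)
      (List.replicate (PySem.List.pyGetD O 0 []).length 0)
  PySem.List.sorted (PySem.List.pyRange 0 (PySem.List.len sums) 1)
    (fun i => PySem.List.pyGetD sums i 0) false

-- ===== PRECONDITION & SPEC =====
-- Pre_ excludes exactly the inputs on which Python A raises: O = [] (IndexError on O[0]) and
-- matrices with a row shorter than row 0 (IndexError on O[l][p]).
def Pre_mbul (solution_space : Int) (min_start : Int) (O : List (List (Option Int))) (deadline : Int) : Prop :=
  O ≠ [] ∧ ∀ row ∈ O, (PySem.List.pyGetD O 0 []).length ≤ row.length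
instance (solution_space : Int) (min_start : Int) (O : List (List (Option Int))) (deadline : Int) : Decidable (Pre_mbul solution_space min_start O deadline) := by unfold Pre_mbul; infer_instance

def pvWitness_mbul : Int × Int × List (List (Option Int)) × Int :=
  (0, 0, [[some 1, none], [some 2, some 0]], 7)

def Spec_mbul (solution_space : Int) (min_start : Int) (O : List (List (Option Int))) (deadline : Int) (out : List Int) : Prop := out = mbul_alt solution_space min_start O deadline
instance (solution_space : Int) (min_start : Int) (O : List (List (Option Int))) (deadline : Int) (out : List Int) : Decidable (Spec_mbul solution_space min_start O deadline out) := by unfold Spec_mbul; infer_instance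

-- ===== CLAIM (what is proved, stated in full; the proofs are below) =====
def Claim_equal_mbul : Prop := ∀ (solution_space : Int) (min_start : Int) (O : List (List (Option Int))) (deadline : Int), Dom_mbul solution_space min_start O deadline → Pre_mbul solution_space min_start O deadline → Spec_mbul solution_space min_start O deadline (mbul solution_space min_start O deadline)

-- ===== LEMMAS AND PROOFS =====

-- ---- the column-sum loops agree ----

-- the sumsp component of one inner step
def gP (row : List (Option Int)) (s : List Int) (p : Int) : List Int :=
  match PySem.List.pyGetD row p none with
  | some v => PySem.List.pySetD s p (PySem.List.pyGetD s p 0 + v)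
  | none => s

theorem foldl_snd {σ₁ σ₂ β : Type} (F : σ₁ × σ₂ → β → σ₁ × σ₂) (g : σ₂ → β → σ₂)
    (h : ∀ st e, (F st e).2 = g st.2 e) :
    ∀ (L : List β) (st : σ₁ × σ₂), (L.foldl F st).2 = L.foldl g st.2 := by
  intro L
  induction L with
  | nil => intro st; rfl
  | cons e L ih =>
      intro st
      simp only [List.foldl_cons]
      rw [ih (F st e), h]

theorem mbulStep_snd (row : List (Option Int)) (l : Int) :
    ∀ (st : List Int × List Int) (p : Int), (mbulStep row l st p).2 = gP row st.2 p := by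
  intro st p
  unfold mbulStep gP
  rcases hv : PySem.List.pyGetD row p none with _ | v <;> simp

theorem mbulSums_snd (O : List (List (Option Int))) :
    (mbulSums O).2 = O.foldl
      (fun s row => (PySem.List.pyRange 0 (PySem.List.len (PySem.List.pyGetD O 0 [])) 1).foldl (gP row) s)
      ((PySem.List.pyGetD O 0 []).map (fun _ => (0:Int))) := by
  unfold mbulSums
  rw [foldl_snd _
        (fun s2 l => (PySem.List.pyRange 0 (PySem.List.len (PySem.List.pyGetD O 0 [])) 1).foldl
            (gP (PySem.List.pyGetD O l [])) s2)
        (fun st l => foldl_snd _ _ (mbulStep_snd (PySem.List.pyGetD O l []) l) _ st)]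
  have h := PySem.List.foldl_pyRange_pyGetD O ([] : List (Option Int))
      (fun s2 row => (PySem.List.pyRange 0 (PySem.List.len (PySem.List.pyGetD O 0 [])) 1).foldl (gP row) s2)
      ((PySem.List.pyGetD O 0 []).map (fun _ => (0:Int))) (le_refl (0:Int))
  simpa using h

theorem gP_fold_getD (row : List (Option Int)) :
    ∀ (M : Nat) (s : List Int), M ≤ s.length →
      ((PySem.List.pyRange 0 (M:Int) 1).foldl (gP row) s).length = s.length ∧
      ∀ q : Nat, PySem.List.pyGetD ((PySem.List.pyRange 0 (M:Int) 1).foldl (gP row) s) (q:Int) 0 =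
        if q < M then s.getD q 0 + ((row.getD q none).getD 0) else s.getD q 0 := by
  intro M
  induction M with
  | zero =>
      intro s _
      constructor
      · simp [PySem.List.pyRange_one_eq_nil (le_refl (0:Int))]
      · intro q
        simp [PySem.List.pyRange_one_eq_nil (le_refl (0:Int))]
  | succ M ih =>
      intro s hs
      have hsplit : (PySem.List.pyRange 0 ((M+1:Nat):Int) 1).foldl (gP row) s
          = gP row ((PySem.List.pyRange 0 (M:Int) 1).foldl (gP row) s) (M:Int) := by
        have h1 : ((M+1:Nat):Int) = (M:Int)+1 := by push_cast; ring
        rw [h1, PySem.List.pyRange_one_succ_right (Int.natCast_nonneg M), List.foldl_append]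
        rfl
      obtain ⟨hlen, hget⟩ := ih s (Nat.le_of_succ_le hs)
      rw [hsplit]
      rcases hrow : row.getD M none with _ | v
      · have hstep : gP row ((PySem.List.pyRange 0 (M:Int) 1).foldl (gP row) s) (M:Int)
            = (PySem.List.pyRange 0 (M:Int) 1).foldl (gP row) s := by
          unfold gP; rw [PySem.List.pyGetD_natCast, hrow]
        rw [hstep]
        refine ⟨hlen, ?_⟩
        intro q
        rw [hget q]
        by_cases hq : q < M
        · simp [hq, Nat.lt_succ_of_lt hq]
        · by_cases hq' : q < M+1
          · have hqM : q = M := by omega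
            subst hqM
            rw [if_neg hq, if_pos hq', hrow]
            simp
          · simp [hq, hq']
      · have hstep : gP row ((PySem.List.pyRange 0 (M:Int) 1).foldl (gP row) s) (M:Int)
            = PySem.List.pySetD ((PySem.List.pyRange 0 (M:Int) 1).foldl (gP row) s) (M:Int)
                (PySem.List.pyGetD ((PySem.List.pyRange 0 (M:Int) 1).foldl (gP row) s) (M:Int) 0 + v) := by
          unfold gP; rw [PySem.List.pyGetD_natCast, hrow]
        rw [hstep]
        have hMr : M < ((PySem.List.pyRange 0 (M:Int) 1).foldl (gP row) s).length := by
          rw [hlen]; omega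
        constructor
        · rw [PySem.List.pySetD_natCast, List.length_set, hlen]
        · intro q
          rw [PySem.List.pyGetD_pySetD_natCast _ M q _ _ hMr]
          by_cases hq : q = M
          · subst hq
            rw [if_pos rfl, hget q, if_neg (Nat.lt_irrefl q), if_pos (Nat.lt_succ_self q), hrow]
            rfl
          · rw [if_neg hq, hget q]
            by_cases hq2 : q < M
            · simp [hq2, Nat.lt_succ_of_lt hq2]
            · have hq3 : ¬ q < M+1 := by omega
              simp [hq2, hq3]

theorem gP_fold_eq_zipWith (row : List (Option Int)) (s : List Int) (hs : s.length ≤ row.length) :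
    (PySem.List.pyRange 0 (s.length:Int) 1).foldl (gP row) s
      = List.zipWith (fun a v => a + v.getD 0) s row := by
  obtain ⟨hlen, hget⟩ := gP_fold_getD row s.length s le_rfl
  apply List.ext_getElem
  · rw [hlen, List.length_zipWith]; omega
  · intro q h1 h2
    have hq : q < s.length := by rw [hlen] at h1; exact h1
    have hg := hget q
    rw [PySem.List.pyGetD_natCast] at hg
    rw [List.getD_eq_getElem?_getD, List.getElem?_eq_getElem h1] at hg
    simp only [if_pos hq, Option.getD_some] at hg
    rw [List.getElem_zipWith, hg]
    congr 1
    · rw [List.getD_eq_getElem?_getD, List.getElem?_eq_getElem hq]; rfl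
    · rw [List.getD_eq_getElem?_getD, List.getElem?_eq_getElem (lt_of_lt_of_le hq hs)]; rfl

theorem folds_eq (m : Nat) : ∀ (Os : List (List (Option Int))) (s : List Int), s.length = m →
    (∀ row ∈ Os, m ≤ row.length) →
    Os.foldl (fun s row => (PySem.List.pyRange 0 (m:Int) 1).foldl (gP row) s) s
      = Os.foldl (fun s row => List.zipWith (fun a v => a + v.getD 0) s row) s := by
  intro Os
  induction Os with
  | nil => intro s _ _; rfl
  | cons row Os ih =>
      intro s hsm hrows
      simp only [List.foldl_cons]
      have hrl : m ≤ row.length := hrows row List.mem_cons_self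
      have h1 : (PySem.List.pyRange 0 (m:Int) 1).foldl (gP row) s
          = List.zipWith (fun a v => a + v.getD 0) s row := by
        have := gP_fold_eq_zipWith row s (by omega)
        rw [hsm] at this
        exact this
      rw [h1]
      apply ih
      · rw [List.length_zipWith]; omega
      · intro r hr; exact hrows r (List.mem_cons_of_mem _ hr)

theorem sums_eq (O : List (List (Option Int)))
    (hrows : ∀ row ∈ O, (PySem.List.pyGetD O 0 []).length ≤ row.length) :
    (mbulSums O).2 = O.foldl (fun s row => List.zipWith (fun a v => a + v.getD 0) s row)
      (List.replicate (PySem.List.pyGetD O 0 []).length 0) := by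
  rw [mbulSums_snd]
  have hinit : (PySem.List.pyGetD O 0 []).map (fun _ => (0:Int))
      = List.replicate (PySem.List.pyGetD O 0 []).length 0 := List.map_const'
  rw [hinit]
  simp only [PySem.List.len_eq]
  exact folds_eq (PySem.List.pyGetD O 0 []).length O _ (List.length_replicate) hrows

-- ---- the selection loop is a stable ascending argsort ----

def RK (key : Int → Int) (a b : Int) : Prop :=
  key a < key b ∨ (key a = key b ∧ a < b)

theorem RK_asymm (key : Int → Int) (a b : Int) (h1 : RK key a b) (h2 : RK key b a) : False := by
  rcases h1 with h1 | ⟨h1, h1'⟩ <;> rcases h2 with h2 | ⟨h2, h2'⟩ <;> omega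

def keyOf (S : List Int) (i : Int) : Int := PySem.List.pyGetD S i 0

def MaskOf (S : List Int) (w : List (Option Int)) : Prop :=
  w.length = S.length ∧ ∀ q : Nat, q < S.length →
    w.getD q none = some (S.getD q 0) ∨ w.getD q none = none

def liveOf (S : List Int) (w : List (Option Int)) : List Int :=
  (PySem.List.pyRange 0 (S.length:Int) 1).filter
    (fun i => (PySem.List.pyGetD w i none).isSome)

theorem scan_spec (w : List (Option Int)) : ∀ (k : Nat), k ≤ w.length →
    ((PySem.List.pyRange 0 (k:Int) 1).foldl (mbulScanStep w) (none, none)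
        = ((none : Option Int), (none : Option Int)) ∧
      ∀ j : Nat, j < k → w.getD j none = none) ∨
    (∃ (lo : Int) (ix : Nat),
      (PySem.List.pyRange 0 (k:Int) 1).foldl (mbulScanStep w) (none, none)
        = (some lo, some (ix:Int)) ∧
      ix < k ∧ w.getD ix none = some lo ∧
      ∀ j : Nat, j < k → ∀ v, w.getD j none = some v → lo ≤ v ∧ (j < ix → lo < v)) := by
  intro k
  induction k with
  | zero =>
      intro _
      left
      constructor
      · simp [PySem.List.pyRange_one_eq_nil (le_refl (0:Int))]
      · intro j hj; omega
  | succ k ih =>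
      intro hk
      have ihh := ih (by omega)
      have hsplit : (PySem.List.pyRange 0 ((k+1:Nat):Int) 1).foldl (mbulScanStep w) (none, none)
          = mbulScanStep w
              ((PySem.List.pyRange 0 (k:Int) 1).foldl (mbulScanStep w) (none, none)) (k:Int) := by
        have h1 : ((k+1:Nat):Int) = (k:Int)+1 := by push_cast; ring
        rw [h1, PySem.List.pyRange_one_succ_right (Int.natCast_nonneg k), List.foldl_append]
        rfl
      rw [hsplit]
      rcases ihh with ⟨hst, hnone⟩ | ⟨lo, ix, hst, hix, hval, hmin⟩
      · rcases hke : w.getD k none with _ | v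
        · left
          rw [hst]
          constructor
          · unfold mbulScanStep
            rw [PySem.List.pyGetD_natCast, hke]
          · intro j hj
            by_cases hjk : j < k
            · exact hnone j hjk
            · have : j = k := by omega
              subst this; exact hke
        · right
          refine ⟨v, k, ?_, by omega, hke, ?_⟩
          · rw [hst]
            unfold mbulScanStep
            rw [PySem.List.pyGetD_natCast, hke]
          · intro j hj v' hv'
            by_cases hjk : j < k
            · rw [hnone j hjk] at hv'; cases hv'
            · have : j = k := by omega
              subst this
              rw [hke] at hv'
              cases hv'
              exact ⟨le_rfl, by omega⟩
      · rcases hke : w.getD k none with _ | v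
        · right
          refine ⟨lo, ix, ?_, by omega, hval, ?_⟩
          · rw [hst]
            unfold mbulScanStep
            rw [PySem.List.pyGetD_natCast, hke]
          · intro j hj v' hv'
            by_cases hjk : j < k
            · exact hmin j hjk v' hv'
            · have : j = k := by omega
              subst this
              rw [hke] at hv'; cases hv'
        · by_cases hvlo : v < lo
          · right
            refine ⟨v, k, ?_, by omega, hke, ?_⟩
            · rw [hst]
              unfold mbulScanStep
              rw [PySem.List.pyGetD_natCast, hke]
              simp [hvlo]
            · intro j hj v' hv'
              by_cases hjk : j < k
              · have := (hmin j hjk v' hv').1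
                exact ⟨by omega, fun _ => by omega⟩
              · have : j = k := by omega
                subst this
                rw [hke] at hv'
                cases hv'
                exact ⟨le_rfl, by omega⟩
          · right
            refine ⟨lo, ix, ?_, by omega, hval, ?_⟩
            · rw [hst]
              unfold mbulScanStep
              rw [PySem.List.pyGetD_natCast, hke]
              simp [hvlo]
            · intro j hj v' hv'
              by_cases hjk : j < k
              · exact hmin j hjk v' hv'
              · have : j = k := by omega
                subst this
                rw [hke] at hv'
                cases hv'
                exact ⟨by omega, fun h => by omega⟩
theorem getD_set_none (w : List (Option Int)) (ix q : Nat) (hix : ix < w.length) :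
    (w.set ix none).getD q none = if q = ix then none else w.getD q none := by
  by_cases h : q = ix
  · subst h
    simp [List.getD_eq_getElem?_getD, List.getElem?_set, hix]
  · simp [List.getD_eq_getElem?_getD, List.getElem?_set, h, Ne.symm h]

theorem loop_spec (S : List Int) : ∀ (fuel : Nat) (w : List (Option Int)) (acc : List Int),
    MaskOf S w → (liveOf S w).length < fuel →
    ∃ rest, mbulLoop fuel w acc = acc ++ rest ∧ rest.Perm (liveOf S w) ∧
      rest.Pairwise (RK (keyOf S)) := by
  intro fuel
  induction fuel with
  | zero => intro w acc _ h; omega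
  | succ fuel ih =>
    intro w acc hmask hfuel
    obtain ⟨hwlen, hmaskq⟩ := hmask
    have hscan := scan_spec w w.length le_rfl
    have hscan_eq : mbulScan w
        = (PySem.List.pyRange 0 (w.length:Int) 1).foldl (mbulScanStep w) (none, none) := by
      unfold mbulScan
      rw [PySem.List.len_eq]
    rcases hscan with ⟨hst, hnone⟩ | ⟨lo, ix, hst, hix, hval, hmin⟩
    · have hlive : liveOf S w = [] := by
        unfold liveOf
        apply List.filter_eq_nil_iff.mpr
        intro j hj
        obtain ⟨hj0, hjlt⟩ := PySem.List.mem_pyRange_one.mp hj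
        have hjn : j = ((j.toNat : Nat) : Int) := (Int.toNat_of_nonneg hj0).symm
        rw [hjn, PySem.List.pyGetD_natCast]
        have hjw : j.toNat < w.length := by omega
        rw [hnone j.toNat hjw]
        simp
      refine ⟨[], ?_, by rw [hlive], List.Pairwise.nil⟩
      show mbulLoop (fuel+1) w acc = acc ++ []
      simp only [mbulLoop]
      rw [hscan_eq, hst]
      simp
    · have hixS : ix < S.length := by omega
      have hset : PySem.List.pySetD w (ix:Int) none = w.set ix none :=
        PySem.List.pySetD_natCast w ix none
      have hmask' : MaskOf S (PySem.List.pySetD w (ix:Int) none) := by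
        constructor
        · rw [hset, List.length_set, hwlen]
        · intro q hq
          rw [hset, getD_set_none w ix q (by omega)]
          by_cases h : q = ix
          · rw [if_pos h]; right; rfl
          · rw [if_neg h]; exact hmaskq q hq
      have hpt : ∀ j ∈ PySem.List.pyRange 0 (S.length:Int) 1,
          ((PySem.List.pyGetD (PySem.List.pySetD w (ix:Int) none) j none).isSome)
            = (((PySem.List.pyGetD w j none).isSome) && (j != (ix:Int))) := by
        intro j hj
        obtain ⟨hj0, hjlt⟩ := PySem.List.mem_pyRange_one.mp hj
        have hjn : j = ((j.toNat : Nat) : Int) := (Int.toNat_of_nonneg hj0).symm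
        rw [hjn, PySem.List.pyGetD_natCast, PySem.List.pyGetD_natCast, hset,
            getD_set_none w ix j.toNat (by omega)]
        by_cases h : j.toNat = ix
        · rw [if_pos h]
          have hbe : (((j.toNat : Nat) : Int) != ((ix : Nat) : Int)) = false := by
            simp [h]
          rw [hbe]
          simp
        · rw [if_neg h]
          have hbe : (((j.toNat : Nat) : Int) != ((ix : Nat) : Int)) = true := by
            simp only [bne_iff_ne, ne_eq, Int.natCast_inj]
            simp [h]
          rw [hbe]
          simp
      have hlive' : liveOf S (PySem.List.pySetD w (ix:Int) none)
          = (liveOf S w).filter (fun j => j != (ix:Int)) := by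
        unfold liveOf
        rw [List.filter_filter]
        rw [List.filter_congr hpt]
        exact List.filter_congr (fun x _ => Bool.and_comm _ _)
      have hnd : (liveOf S w).Nodup :=
        List.Nodup.filter _ (PySem.List.nodup_pyRange_one 0 (S.length:Int))
      have hmem : (ix:Int) ∈ liveOf S w := by
        unfold liveOf
        apply List.mem_filter.mpr
        refine ⟨PySem.List.mem_pyRange_one.mpr ⟨by omega, by omega⟩, ?_⟩
        rw [PySem.List.pyGetD_natCast, hval]
        rfl
      have herase : (liveOf S w).erase (ix:Int) = (liveOf S w).filter (fun j => j != (ix:Int)) := by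
        rw [List.Nodup.erase_eq_filter hnd]
      have hperm : (liveOf S w).Perm ((ix:Int) :: liveOf S (PySem.List.pySetD w (ix:Int) none)) := by
        rw [hlive', ← herase]
        exact List.perm_cons_erase hmem
      have hlen' : (liveOf S (PySem.List.pySetD w (ix:Int) none)).length < (liveOf S w).length := by
        rw [hlive', ← herase, List.length_erase_of_mem hmem]
        have hpos : 0 < (liveOf S w).length := List.length_pos_of_mem hmem
        omega
      obtain ⟨rest', hloop', hperm', hpair'⟩ :=
        ih (PySem.List.pySetD w (ix:Int) none) (acc ++ [(ix:Int)]) hmask' (by omega)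
      have hkeyix : keyOf S (ix:Int) = lo := by
        have hm := hmaskq ix hixS
        rcases hm with hm | hm
        · rw [hval] at hm
          unfold keyOf
          rw [PySem.List.pyGetD_natCast]
          exact (Option.some_inj.mp hm).symm
        · rw [hval] at hm; cases hm
      refine ⟨(ix:Int) :: rest', ?_, ?_, ?_⟩
      · show mbulLoop (fuel+1) w acc = acc ++ (ix:Int) :: rest'
        simp only [mbulLoop]
        rw [hscan_eq, hst]
        show mbulLoop fuel (PySem.List.pySetD w (ix:Int) none) (acc ++ [(ix:Int)]) = _
        rw [hloop']
        simp
      · exact (hperm'.cons ((ix:Int))).trans hperm.symm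
      · constructor
        · intro j hj
          have hjlive : j ∈ liveOf S (PySem.List.pySetD w (ix:Int) none) := hperm'.mem_iff.mp hj
          rw [hlive'] at hjlive
          obtain ⟨hjl, hjne⟩ := List.mem_filter.mp hjlive
          obtain ⟨hjr, hjs⟩ := List.mem_filter.mp hjl
          obtain ⟨hj0, hjlt⟩ := PySem.List.mem_pyRange_one.mp hjr
          have hjn : j = ((j.toNat : Nat) : Int) := (Int.toNat_of_nonneg hj0).symm
          have hjS : j.toNat < S.length := by omega
          rw [hjn, PySem.List.pyGetD_natCast] at hjs
          rcases hv : w.getD j.toNat none with _ | v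
          · rw [hv] at hjs; simp at hjs
          · have hmv := hmin j.toNat (by omega) v hv
            have hkeyj : keyOf S j = v := by
              have hm := hmaskq j.toNat hjS
              rcases hm with hm | hm
              · rw [hv] at hm
                unfold keyOf
                rw [hjn, PySem.List.pyGetD_natCast]
                exact (Option.some_inj.mp hm).symm
              · rw [hv] at hm; cases hm
            have hneq : j.toNat ≠ ix := by
              intro hc
              rw [hjn, hc] at hjne
              simp at hjne
            unfold RK
            rcases lt_or_eq_of_le hmv.1 with hlt | heq
            · left
              rw [hkeyix, hkeyj]
              exact hlt
            · right
              constructor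
              · rw [hkeyix, hkeyj]; omega
              · have hnotlt : ¬ j.toNat < ix := by
                  intro hc
                  have := hmv.2 hc
                  omega
                rw [hjn]
                have : ix < j.toNat := by omega
                exact_mod_cast this
        · exact hpair'

-- ---- stability of the library insertion sort ----

theorem insertBy_pairwise (key : Int → Int) (x : Int) :
    ∀ (acc : List Int), acc.Pairwise (RK key) → (∀ y ∈ acc, y < x) →
    (PySem.List.insertBy (fun a b => decide (key a < key b)) x acc).Pairwise (RK key) := by
  intro acc
  induction acc with
  | nil =>
      intro _ _
      simp [PySem.List.insertBy]
  | cons y ys ih =>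
      intro hp hlt
      obtain ⟨hy, hys⟩ := List.pairwise_cons.mp hp
      by_cases hxy : key x < key y
      · have hins : PySem.List.insertBy (fun a b => decide (key a < key b)) x (y :: ys)
            = x :: y :: ys := by
          simp [PySem.List.insertBy, hxy]
        rw [hins]
        constructor
        · intro z hz
          rcases List.mem_cons.mp hz with hz | hz
          · subst hz
            exact Or.inl hxy
          · have hyz := hy z hz
            unfold RK at hyz ⊢
            rcases hyz with h | ⟨h, _⟩
            · exact Or.inl (by omega)
            · exact Or.inl (by omega)
        · exact hp
      · have hins : PySem.List.insertBy (fun a b => decide (key a < key b)) x (y :: ys)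
            = y :: PySem.List.insertBy (fun a b => decide (key a < key b)) x ys := by
          simp [PySem.List.insertBy, hxy]
        rw [hins]
        constructor
        · intro z hz
          rcases (PySem.List.mem_insertBy _ _ _ _).mp hz with hzx | hzy
          · subst hzx
            unfold RK
            rcases lt_or_eq_of_le (not_lt.mp hxy) with h | h
            · exact Or.inl h
            · exact Or.inr ⟨h, hlt y List.mem_cons_self⟩
          · exact hy z hzy
        · exact ih hys (fun y' h => hlt y' (List.mem_cons_of_mem _ h))

theorem foldl_insertBy_pairwise (key : Int → Int) :
    ∀ (xs acc : List Int), acc.Pairwise (RK key) → (∀ y ∈ acc, ∀ x ∈ xs, y < x) →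
    xs.Pairwise (· < ·) →
    (xs.foldl (fun acc x => PySem.List.insertBy (fun a b => decide (key a < key b)) x acc)
      acc).Pairwise (RK key) := by
  intro xs
  induction xs with
  | nil => intro acc hp _ _; exact hp
  | cons x xs ih =>
      intro acc hp hlt hx
      obtain ⟨hxh, hxt⟩ := List.pairwise_cons.mp hx
      simp only [List.foldl_cons]
      apply ih
      · exact insertBy_pairwise key x acc hp (fun y hy => hlt y hy x List.mem_cons_self)
      · intro y hy x' hx'
        rcases (PySem.List.mem_insertBy _ _ _ _).mp hy with h | h
        · subst h
          exact hxh x' hx'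
        · exact hlt y h x' (List.mem_cons_of_mem _ hx')
      · exact hxt

theorem sorted_stable (S : List Int) (xs : List Int) (hxs : xs.Pairwise (· < ·)) :
    (PySem.List.sorted xs (keyOf S) false).Pairwise (RK (keyOf S)) := by
  rw [PySem.List.sorted_eq_foldl_insertBy]
  exact foldl_insertBy_pairwise (keyOf S) xs [] List.Pairwise.nil (by simp) hxs

-- ===== VERDICT (by name: the statement is the Claim_ definition above) =====
theorem mbul_spec : Claim_equal_mbul := by
  unfold Claim_equal_mbul
  intro solution_space min_start O deadline _ hpre
  obtain ⟨hO, hrows⟩ := hpre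
  unfold Spec_mbul
  show mbul solution_space min_start O deadline = mbul_alt solution_space min_start O deadline
  unfold mbul mbul_alt
  have hsums := sums_eq O hrows
  rw [hsums]
  set S := O.foldl (fun s row => List.zipWith (fun a v => a + v.getD 0) s row)
      (List.replicate (PySem.List.pyGetD O 0 []).length 0) with hS
  have hmask : MaskOf S (S.map some) := by
    constructor
    · simp
    · intro q hq
      left
      rw [List.getD_eq_getElem?_getD, List.getElem?_map, List.getElem?_eq_getElem hq]
      rw [List.getD_eq_getElem?_getD, List.getElem?_eq_getElem hq]
      rfl
  have hlive0 : liveOf S (S.map some) = PySem.List.pyRange 0 (S.length:Int) 1 := by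
    unfold liveOf
    apply List.filter_eq_self.mpr
    intro j hj
    obtain ⟨hj0, hjlt⟩ := PySem.List.mem_pyRange_one.mp hj
    have hjn : j = ((j.toNat : Nat) : Int) := (Int.toNat_of_nonneg hj0).symm
    have hjS : j.toNat < S.length := by omega
    rw [hjn, PySem.List.pyGetD_natCast]
    rw [List.getD_eq_getElem?_getD, List.getElem?_map, List.getElem?_eq_getElem hjS]
    rfl
  have hfuel : (liveOf S (S.map some)).length < (S.map some).length + 1 := by
    rw [hlive0, PySem.List.length_pyRange_one]
    simp
  obtain ⟨rest, hloop, hperm, hpair⟩ :=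
    loop_spec S ((S.map some).length + 1) (S.map some) [] hmask hfuel
  rw [hloop, List.nil_append]
  show rest = PySem.List.sorted (PySem.List.pyRange 0 (S.length:Int) 1) (keyOf S) false
  have hBperm := PySem.List.sorted_perm (PySem.List.pyRange 0 (S.length:Int) 1) (keyOf S) false
  have hBpair := sorted_stable S (PySem.List.pyRange 0 (S.length:Int) 1)
      (PySem.List.pairwise_lt_pyRange_one 0 (S.length:Int))
  have hperm2 : rest.Perm (PySem.List.sorted (PySem.List.pyRange 0 (S.length:Int) 1) (keyOf S) false) := by
    rw [hlive0] at hperm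
    exact hperm.trans hBperm.symm
  exact List.Perm.eq_of_pairwise
    (fun a b _ _ h1 h2 => (RK_asymm (keyOf S) a b h1 h2).elim)
    hpair hBpair hperm2
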